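-- pv_equiv track=rewrite | github.com/YJJ1508/Algorithm | 프로그래머스/2/142085. 디펜스 게임/디펜스 게임.py | solution
-- ===== SOURCE A (Python) =====
-- from heapq import heappop, heappush
--
-- def solution(n, k, enemy):
--     answer, total = 0,0
--     heap = []
--
--     for e in enemy:
--         heappush(heap, -e)
--         total += e
--         if total > n:
--             if k == 0: break
--             total += heappop(heap)
--             k -= 1
--         answer += 1
--
--     return answer
-- ===== SOURCE B (Python) =====
-- def solution(n, k, enemy):
--     # Binary search on the answer: m rounds are survivable iff m <= k
--     # or the sum of the (m - k) smallest values of enemy[:m] is <= n.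
--     def feasible(m):
--         if m <= k:
--             return True
--         waves = sorted(enemy[:m])
--         return sum(waves[:m - k]) <= n
--
--     lo, hi = 0, len(enemy)
--     while lo < hi:
--         mid = (lo + hi + 1) // 2
--         if feasible(mid):
--             lo = mid
--         else:
--             hi = mid - 1
--     return lo
-- ===== Notes on version B (the rewrite author's own statement) =====
-- stated objective: alternative
-- what changed: Replaces A's online greedy pass with a max-heap of skippable waves by an offline binary search on the number of rounds, deciding each candidate m by sorting the prefix and checking that the sum of its m-k smallest values is at most n.
-- outside the precondition, e.g. on solution(0, 1, [1, -2, 3]): A returns 2, B returns 3; on solution(5, -1, [10, 10]): A returns 2, B returns 0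
import Mathlib
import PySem

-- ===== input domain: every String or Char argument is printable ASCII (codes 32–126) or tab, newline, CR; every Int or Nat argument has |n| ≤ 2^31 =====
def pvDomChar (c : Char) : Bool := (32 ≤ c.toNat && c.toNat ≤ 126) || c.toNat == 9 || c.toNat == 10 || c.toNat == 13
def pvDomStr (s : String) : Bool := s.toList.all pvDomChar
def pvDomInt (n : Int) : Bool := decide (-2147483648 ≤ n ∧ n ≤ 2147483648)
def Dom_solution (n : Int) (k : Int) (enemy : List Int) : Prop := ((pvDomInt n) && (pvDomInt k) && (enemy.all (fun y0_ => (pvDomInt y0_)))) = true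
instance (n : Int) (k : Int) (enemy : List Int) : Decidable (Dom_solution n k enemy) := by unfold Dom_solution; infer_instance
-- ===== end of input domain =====

-- B replaces A's online max-heap greedy by a binary search on the answer; proved equal on the
-- game's natural domain (nonnegative wave sizes, nonnegative skip count k).

-- ===== PORT A =====
-- heapq on a list of Ints, modelled by its observable contract: the heap list is kept in
-- ascending order (heappush = sorted insertion, exact as a multiset-with-min structure),
-- and heappop returns the head (the minimum).
def hpush (heap : List Int) (x : Int) : List Int :=
  match heap with
  | [] => [x]
  | h :: t => if x ≤ h then x :: h :: t else h :: hpush t x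

-- the for-loop of A, with early 'break' returning the accumulated answer
def goA (n : Int) : List Int → Int → Int → List Int → Int → Int
  | [], ans, _total, _heap, _k => ans
  | e :: rest, ans, total, heap, k =>
    if n < total + e then
      if k = 0 then ans
      else
        match hpush heap (-e) with
        | [] => ans + 1  -- unreachable: hpush never returns []
        | m :: hrest => goA n rest (ans + 1) ((total + e) + m) hrest (k - 1)
    else goA n rest (ans + 1) (total + e) (hpush heap (-e)) k

def solution (n : Int) (k : Int) (enemy : List Int) : Int :=
  goA n enemy 0 0 [] k

-- ===== PORT B =====
-- feasible(m) of Source B: m <= k, or the sum of the (m-k) smallest values of enemy[:m] is <= n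
def feasibleB (n : Int) (k : Int) (enemy : List Int) (m : Int) : Bool :=
  if m ≤ k then true
  else
    let waves := PySem.List.sorted (PySem.List.slice enemy none (some m)) (fun x => x) false
    decide ((PySem.List.slice waves none (some (m - k))).sum ≤ n)

-- the while-loop of Source B: binary search for the largest feasible m
def bsearchB (n : Int) (k : Int) (enemy : List Int) (lo hi : Int) : Int :=
  if h : lo < hi then
    let mid := PySem.Int.floordiv (lo + hi + 1) 2
    if feasibleB n k enemy mid then bsearchB n k enemy mid hi
    else bsearchB n k enemy lo (mid - 1)
  else lo
termination_by (hi - lo).toNat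
decreasing_by
  · simp only [PySem.Int.floordiv_eq_ediv_of_pos (by omega : (0:Int) < 2)] at *; omega
  · simp only [PySem.Int.floordiv_eq_ediv_of_pos (by omega : (0:Int) < 2)] at *; omega

def solution_alt (n : Int) (k : Int) (enemy : List Int) : Int :=
  bsearchB n k enemy 0 (PySem.List.len enemy)

-- ===== PRECONDITION & SPEC =====
-- sum of the positive wave sizes (an upper bound for every total the game can reach)
def posSum (l : List Int) : Int := (l.map (fun e => max e 0)).sum

-- Pre_ admits the game's natural domain (nonnegative skip count k and nonnegative wave sizes)
-- and, beyond it, every input where nothing can go wrong (all positive waves fit in n, or there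
-- are at least as many skips as rounds); outside Pre_ (negative waves with tight n and k, or a
-- negative k) A's forced greedy pops are not the optimal skips resp. A never breaks, and the two
-- programs may differ.
def Pre_solution (n : Int) (k : Int) (enemy : List Int) : Prop :=
  (0 ≤ k ∧ ∀ e ∈ enemy, 0 ≤ e) ∨ posSum enemy ≤ n ∨ (enemy.length : Int) ≤ k
instance (n : Int) (k : Int) (enemy : List Int) : Decidable (Pre_solution n k enemy) := by
  unfold Pre_solution; infer_instance

def pvWitness_solution : Int × Int × List Int := (10, 2, [4, 5, 6, 3])

def Spec_solution (n : Int) (k : Int) (enemy : List Int) (out : Int) : Prop := out = solution_alt n k enemy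
instance (n : Int) (k : Int) (enemy : List Int) (out : Int) : Decidable (Spec_solution n k enemy out) := by unfold Spec_solution; infer_instance

-- ===== CLAIM (what is proved, stated in full; the proofs are below) =====
def Claim_equal_solution : Prop := ∀ (n : Int) (k : Int) (enemy : List Int), Dom_solution n k enemy → Pre_solution n k enemy → Spec_solution n k enemy (solution n k enemy)

-- ===== LEMMAS AND PROOFS =====

-- descending insertion (after equal elements); proof-side canonical sorted-descending view
def dIns (e : Int) : List Int → List Int
  | [] => [e]
  | h :: t => if h < e then e :: h :: t else h :: dIns e t

def descS (l : List Int) : List Int := l.foldl (fun acc x => dIns x acc) []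

-- sum of all but the t largest elements of l
def gsum (l : List Int) (t : Nat) : Int := ((descS l).drop t).sum

def feasN (n : Int) (kN : Nat) (enemy : List Int) (m : Nat) : Bool :=
  decide (m ≤ kN) || decide (gsum (enemy.take m) kN ≤ n)

def maxFeas (n : Int) (kN : Nat) (enemy : List Int) : Nat :=
  Nat.findGreatest (fun m => feasN n kN enemy m = true) enemy.length

theorem dIns_perm (e : Int) (l : List Int) : (dIns e l).Perm (e :: l) := by
  induction l with
  | nil => simp [dIns]
  | cons h t ih =>
    simp only [dIns]
    split
    · exact List.Perm.refl _
    · exact (ih.cons h).trans (List.Perm.swap e h t)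

theorem dIns_pairwise (e : Int) (l : List Int) (hl : l.Pairwise (fun a b => b ≤ a)) :
    (dIns e l).Pairwise (fun a b => b ≤ a) := by
  induction l with
  | nil => simp [dIns]
  | cons h t ih =>
    simp only [dIns]
    rcases List.pairwise_cons.1 hl with ⟨hh, ht⟩
    split
    · rename_i hlt
      refine List.pairwise_cons.2 ⟨?_, hl⟩
      intro b hb
      rcases hb with _ | hb
      · omega
      · exact le_trans (hh _ (by assumption)) (le_of_lt hlt)
    · rename_i hge
      refine List.pairwise_cons.2 ⟨?_, ih ht⟩
      intro b hb
      have := List.mem_cons.1 ((dIns_perm e t).mem_iff.1 hb)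
      rcases this with h1 | hb'
      · subst h1; omega
      · exact hh _ hb'

theorem descS_append (l : List Int) (e : Int) : descS (l ++ [e]) = dIns e (descS l) := by
  simp [descS]

theorem descS_perm (l : List Int) : (descS l).Perm l := by
  have : ∀ (l : List Int) (acc : List Int),
      (l.foldl (fun acc x => dIns x acc) acc).Perm (l.reverse ++ acc) := by
    intro l
    induction l with
    | nil => simp
    | cons h t ih =>
      intro acc
      simp only [List.foldl_cons, List.reverse_cons, List.append_assoc]
      refine (ih _).trans ?_
      have h1 : (t.reverse ++ dIns h acc).Perm (t.reverse ++ (h :: acc)) :=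
        (dIns_perm h acc).append_left t.reverse
      simpa using h1
  have h := this l []
  have h2 : (l.reverse ++ ([] : List Int)).Perm l := by simpa using List.reverse_perm l
  exact (h.trans h2)

theorem descS_pairwise (l : List Int) : (descS l).Pairwise (fun a b => b ≤ a) := by
  have : ∀ (l : List Int) (acc : List Int), acc.Pairwise (fun a b => b ≤ a) →
      (l.foldl (fun acc x => dIns x acc) acc).Pairwise (fun a b => b ≤ a) := by
    intro l
    induction l with
    | nil => intro acc h; simpa
    | cons h t ih => intro acc hacc; exact ih _ (dIns_pairwise h acc hacc)
  exact this l [] (by simp)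


theorem desc_unique : ∀ (l1 l2 : List Int), l1.Perm l2 →
    l1.Pairwise (fun a b => b ≤ a) → l2.Pairwise (fun a b => b ≤ a) → l1 = l2 := by
  intro l1
  induction l1 with
  | nil => intro l2 hp _ _; simpa using hp.nil_eq
  | cons a t1 ih =>
    intro l2 hp h1 h2
    cases l2 with
    | nil => exact absurd hp.symm.nil_eq (by simp)
    | cons b t2 =>
      have hab : a = b := by
        have ha : a ∈ b :: t2 := hp.mem_iff.1 (by simp)
        have hb : b ∈ a :: t1 := hp.mem_iff.2 (by simp)
        rcases List.mem_cons.1 ha with h | h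
        · exact h
        · rcases List.mem_cons.1 hb with h' | h'
          · exact h'.symm
          · exact le_antisymm ((List.pairwise_cons.1 h2).1 a h) ((List.pairwise_cons.1 h1).1 b h')
      subst hab
      have : t1.Perm t2 := hp.cons_inv
      rw [ih t2 this (List.pairwise_cons.1 h1).2 (List.pairwise_cons.1 h2).2]

theorem asc_unique : ∀ (l1 l2 : List Int), l1.Perm l2 →
    l1.Pairwise (fun a b => a ≤ b) → l2.Pairwise (fun a b => a ≤ b) → l1 = l2 := by
  intro l1 l2 hp h1 h2
  have := desc_unique l1.reverse l2.reverse
    ((l1.reverse_perm.trans hp).trans l2.reverse_perm.symm)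
    (by rw [List.pairwise_reverse]; exact h1)
    (by rw [List.pairwise_reverse]; exact h2)
  have h3 := congrArg List.reverse this
  simpa using h3

theorem dIns_sum (e : Int) (l : List Int) : (dIns e l).sum = e + l.sum := by
  have := (dIns_perm e l).sum_eq
  simpa using this

theorem descS_sum (l : List Int) : (descS l).sum = l.sum := (descS_perm l).sum_eq

theorem descS_length (l : List Int) : (descS l).length = l.length := (descS_perm l).length_eq

theorem hpush_perm (x : Int) : ∀ (l : List Int), (hpush l x).Perm (x :: l) := by
  intro l
  induction l with
  | nil => simp [hpush]
  | cons h t ih =>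
    simp only [hpush]
    split
    · exact List.Perm.refl _
    · exact (ih.cons h).trans (List.Perm.swap x h t)

theorem hpush_pairwise (x : Int) : ∀ (l : List Int), l.Pairwise (fun a b => a ≤ b) →
    (hpush l x).Pairwise (fun a b => a ≤ b) := by
  intro l
  induction l with
  | nil => intro _; simp [hpush]
  | cons h t ih =>
    intro hl
    rcases List.pairwise_cons.1 hl with ⟨hh, ht⟩
    simp only [hpush]
    split
    · rename_i hle
      refine List.pairwise_cons.2 ⟨?_, hl⟩
      intro b hb
      rcases List.mem_cons.1 hb with h1 | h1
      · omega
      · exact le_trans hle (hh _ h1)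
    · rename_i hgt
      refine List.pairwise_cons.2 ⟨?_, ih ht⟩
      intro b hb
      rcases List.mem_cons.1 ((hpush_perm x t).mem_iff.1 hb) with h1 | h1
      · subst h1; omega
      · exact hh _ h1

theorem map_neg_pairwise {l : List Int} (h : l.Pairwise (fun a b => b ≤ a)) :
    (l.map (fun x => -x)).Pairwise (fun a b => a ≤ b) := by
  rw [List.pairwise_map]
  exact h.imp (by intro a b hba; omega)

theorem hpush_eq (D : List Int) (e : Int) (hD : D.Pairwise (fun a b => b ≤ a)) :
    hpush (D.map (fun x => -x)) (-e) = (dIns e D).map (fun x => -x) := by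
  apply asc_unique
  · refine (hpush_perm _ _).trans ?_
    have : ((e :: D).map (fun x => -x)).Perm ((dIns e D).map (fun x => -x)) :=
      ((dIns_perm e D).symm).map _
    simpa using this
  · exact hpush_pairwise _ _ (map_neg_pairwise hD)
  · exact map_neg_pairwise (dIns_pairwise e D hD)

theorem dIns_take_decomp (e : Int) : ∀ (j : Nat) (l : List Int),
    (∀ x ∈ l.take j, e ≤ x) → dIns e l = l.take j ++ dIns e (l.drop j) := by
  intro j
  induction j with
  | zero => intro l _; simp
  | succ j ih =>
    intro l hl
    cases l with
    | nil => simp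
    | cons h t =>
      have he : e ≤ h := hl h (by simp)
      have : ¬ h < e := by omega
      simp only [dIns, this, if_false, List.take_succ_cons, List.drop_succ_cons,
        List.cons_append]
      rw [ih t (by intro x hx; exact hl x (by simp [hx]))]

theorem dIns_drop_of_gt (e : Int) : ∀ (l : List Int) (j : Nat)
    (hj : j < l.length), l.Pairwise (fun a b => b ≤ a) → l[j] < e →
    (dIns e l).drop (j+1) = l[j] :: l.drop (j+1) := by
  intro l
  induction l with
  | nil => intro j hj; simp at hj
  | cons h t ih =>
    intro j hj hp hlt
    cases Nat.eq_zero_or_pos j with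
    | inl hj0 =>
      subst hj0
      simp only [List.getElem_cons_zero] at hlt
      simp [dIns, hlt]
    | inr hjpos =>
      obtain ⟨j', rfl⟩ : ∃ j', j = j' + 1 := ⟨j - 1, by omega⟩
      simp only [List.getElem_cons_succ] at hlt
      by_cases hh : h < e
      · simp only [dIns, hh, if_true]
        simp only [List.drop_succ_cons]
        exact (List.drop_eq_getElem_cons (by simpa using hj)).symm ▸ rfl
      · simp only [dIns, hh, if_false]
        simp only [List.drop_succ_cons]
        exact ih j' (by simpa using hj) (List.pairwise_cons.1 hp).2 hlt

theorem dIns_cons_of_forall_lt (e : Int) (l : List Int) (h : ∀ x ∈ l, x < e) :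
    dIns e l = e :: l := by
  cases l with
  | nil => simp [dIns]
  | cons a t => simp [dIns, h a (by simp)]

theorem sum_drop_le (l : List Int) (hl : ∀ x ∈ l, 0 ≤ x) :
    ∀ (t t' : Nat), t ≤ t' → (l.drop t').sum ≤ (l.drop t).sum := by
  intro t t' htt
  induction t' with
  | zero => have : t = 0 := by omega
            subst this; exact le_refl _
  | succ t'' ih =>
    rcases Nat.lt_or_ge t (t''+1) with h | h
    · refine le_trans ?_ (ih (by omega))
      by_cases hlen : t'' < l.length
      · have hd : (l.drop t'').sum = l[t''] + (l.drop (t''+1)).sum := by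
          rw [List.drop_eq_getElem_cons hlen, List.sum_cons]
        have : 0 ≤ l[t''] := hl _ (List.getElem_mem hlen)
        omega
      · rw [List.drop_eq_nil_of_le (by omega), List.drop_eq_nil_of_le (by omega)]
    · have : t = t'' + 1 := by omega
      subst this; exact le_refl _

theorem sum_drop_dIns_ge (e : Int) (he : 0 ≤ e) :
    ∀ (l : List Int) (t : Nat), (∀ x ∈ l, 0 ≤ x) →
    (l.drop t).sum ≤ ((dIns e l).drop t).sum := by
  intro l
  induction l with
  | nil =>
    intro t _
    cases t with
    | zero => simpa [dIns]
    | succ t' => simp [dIns]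
  | cons h t ih =>
    intro s hl
    by_cases hh : h < e
    · simp only [dIns, hh, if_true]
      cases s with
      | zero => simp; omega
      | succ s' =>
        simp only [List.drop_succ_cons]
        exact sum_drop_le (h :: t) hl s' (s'+1) (by omega)
    · simp only [dIns, hh, if_false]
      cases s with
      | zero =>
        simp only [List.drop_zero, List.sum_cons]
        have h2 := ih 0 (by intro x hx; exact hl x (by simp [hx]))
        simp only [List.drop_zero] at h2
        omega
      | succ s' =>
        simp only [List.drop_succ_cons]
        exact ih s' (by intro x hx; exact hl x (by simp [hx]))


theorem drop_append_len {A B : List Int} {j : Nat} (h : A.length = j) :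
    (A ++ B).drop j = B := by
  subst h; simp

theorem desc_getElem_le {d : List Int} (hd : d.Pairwise (fun a b => b ≤ a))
    {i j : Nat} (hij : i ≤ j) (hj : j < d.length) : d[j] ≤ d[i] := by
  rcases Nat.lt_or_ge i j with h | h
  · exact List.pairwise_iff_getElem.1 hd i j (by omega) hj h
  · have : i = j := by omega
    subst this; exact le_refl _

theorem mem_take_ge {d : List Int} (hd : d.Pairwise (fun a b => b ≤ a))
    {j : Nat} (hj : j ≤ d.length) (hj1 : 1 ≤ j) {x : Int} (hx : x ∈ d.take j) :
    d[j-1]'(by omega) ≤ x := by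
  obtain ⟨i, hi, hxeq⟩ := List.getElem_of_mem hx
  have hi' : i < j := by rw [List.length_take] at hi; omega
  rw [List.getElem_take] at hxeq
  subst hxeq
  exact desc_getElem_le hd (by omega) (by omega)

theorem mem_drop_le {d : List Int} (hd : d.Pairwise (fun a b => b ≤ a))
    {j : Nat} (hj1 : 1 ≤ j) (hj : j ≤ d.length) {x : Int} (hx : x ∈ d.drop j) :
    x ≤ d[j-1]'(by omega) := by
  obtain ⟨i, hi, hxeq⟩ := List.getElem_of_mem hx
  have hi' : j + i < d.length := by rw [List.length_drop] at hi; omega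
  rw [List.getElem_drop] at hxeq
  subst hxeq
  exact desc_getElem_le hd (by omega) (by omega)

theorem dIns_ne_nil (e : Int) (l : List Int) : dIns e l ≠ [] := by
  have := (dIns_perm e l).length_eq
  intro h; rw [h] at this; simp at this

theorem dIns_head_ge {e w : Int} {hr K' : List Int}
    (h : dIns e K' = w :: hr) : e ≤ w := by
  cases K' with
  | nil => simp [dIns] at h; omega
  | cons a t =>
    simp only [dIns] at h
    split at h
    · rename_i hlt; cases h; omega
    · rename_i hge; cases h; omega

theorem descS_nonneg {l : List Int} (h : ∀ x ∈ l, 0 ≤ x) :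
    ∀ x ∈ descS l, 0 ≤ x := fun x hx => h x ((descS_perm l).mem_iff.1 hx)

theorem gsum_anti {l : List Int} (h : ∀ x ∈ l, 0 ≤ x) {t t' : Nat} (htt : t ≤ t') :
    gsum l t' ≤ gsum l t :=
  sum_drop_le (descS l) (descS_nonneg h) t t' htt

theorem gsum_pred {pre : List Int} {j : Nat} (hj1 : 1 ≤ j) (hj : j ≤ pre.length) :
    gsum pre (j-1) = (descS pre)[j-1]'(by rw [descS_length]; omega) + gsum pre j := by
  unfold gsum
  have hlen : j - 1 < (descS pre).length := by rw [descS_length]; omega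
  have h0 := congrArg List.sum (List.drop_eq_getElem_cons hlen)
  rw [List.sum_cons] at h0
  have : j - 1 + 1 = j := by omega
  rw [this] at h0
  exact h0

theorem gsum_append_ge {l : List Int} {e : Int} (hl : ∀ x ∈ l, 0 ≤ x) (he : 0 ≤ e)
    (t : Nat) : gsum l t ≤ gsum (l ++ [e]) t := by
  unfold gsum
  rw [descS_append]
  exact sum_drop_dIns_ge e he (descS l) t (descS_nonneg hl)

theorem gsum_take_mono {enemy : List Int} (h : ∀ x ∈ enemy, 0 ≤ x) {m m' : Nat}
    (hmm : m ≤ m') (t : Nat) : gsum (enemy.take m) t ≤ gsum (enemy.take m') t := by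
  induction m' with
  | zero => have : m = 0 := by omega
            subst this; exact le_refl _
  | succ m'' ih =>
    rcases Nat.lt_or_ge m (m''+1) with hlt | hge
    · refine le_trans (ih (by omega)) ?_
      by_cases hlen : m'' < enemy.length
      · have hts : enemy.take (m''+1) = enemy.take m'' ++ [enemy[m'']] := by
          rw [List.take_succ, List.getElem?_eq_getElem hlen]; rfl
        rw [hts]
        exact gsum_append_ge (by intro x hx; exact h x (List.mem_of_mem_take hx))
          (h _ (List.getElem_mem hlen)) t
      · rw [List.take_of_length_le (by omega), List.take_of_length_le (by omega)]
    · have : m = m'' + 1 := by omega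
      subst this; exact le_refl _

theorem feasN_antitone {n : Int} {kN : Nat} {enemy : List Int}
    (h : ∀ x ∈ enemy, 0 ≤ x) {m m' : Nat} (hmm : m ≤ m')
    (hf : feasN n kN enemy m' = true) : feasN n kN enemy m = true := by
  unfold feasN at *
  rcases Bool.or_eq_true_iff.1 hf with h1 | h1
  · simp only [decide_eq_true_eq] at h1
    simp only [Bool.or_eq_true_iff, decide_eq_true_eq]
    left; omega
  · simp only [decide_eq_true_eq] at h1
    simp only [Bool.or_eq_true_iff, decide_eq_true_eq]
    right
    exact le_trans (gsum_take_mono h hmm kN) h1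


theorem take_drop_pred {d : List Int} {j : Nat} (hj1 : 1 ≤ j) (hj : j ≤ d.length) :
    (d.take j).drop (j-1) = [d[j-1]'(by omega)] := by
  obtain ⟨j', rfl⟩ : ∃ j', j = j' + 1 := ⟨j-1, by omega⟩
  simp only [Nat.add_sub_cancel]
  rw [List.take_succ, List.getElem?_eq_getElem (by omega)]
  rw [drop_append_len (by rw [List.length_take]; omega)]
  rfl

theorem goA_inv (n : Int) (kN : Nat) (enemy : List Int) (hnn : ∀ x ∈ enemy, 0 ≤ x) :
    ∀ (rest pre : List Int) (j : Nat),
    enemy = pre ++ rest → j ≤ kN → j ≤ pre.length →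
    (gsum pre j ≤ n ∨ j = pre.length) →
    (1 ≤ j → n < gsum pre (j-1)) →
    goA n rest (pre.length : Int) (gsum pre j)
        (((descS pre).drop j).map (fun x => -x)) ((kN : Int) - (j : Int))
      = (maxFeas n kN enemy : Int) := by
  intro rest
  induction rest with
  | nil =>
    intro pre j henemy hjk hjp hI2 _hI4
    have hpre : enemy = pre := by simpa using henemy
    subst hpre
    simp only [goA]
    have hfeas : feasN n kN enemy enemy.length = true := by
      unfold feasN
      rcases hI2 with h2 | h2
      · simp only [Bool.or_eq_true_iff, decide_eq_true_eq]
        right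
        rw [List.take_length]
        exact le_trans (gsum_anti hnn hjk) h2
      · simp only [Bool.or_eq_true_iff, decide_eq_true_eq]
        left; omega
    have h1 : enemy.length ≤ maxFeas n kN enemy :=
      Nat.le_findGreatest (le_refl _) hfeas
    have h2 : maxFeas n kN enemy ≤ enemy.length := Nat.findGreatest_le _
    have : maxFeas n kN enemy = enemy.length := by omega
    rw [this]
  | cons e rest' ih =>
    intro pre j henemy hjk hjp hI2 hI4
    have he : (0:Int) ≤ e := hnn e (by rw [henemy]; simp)
    have hnnpre : ∀ x ∈ pre, 0 ≤ x := fun x hx => hnn x (by rw [henemy]; simp [hx])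
    have hdp := descS_pairwise pre
    have hdlen := descS_length pre
    have hKp : ((descS pre).drop j).Pairwise (fun a b => b ≤ a) := hdp.drop
    have hKsum : ((descS pre).drop j).sum = gsum pre j := rfl
    have htkj : ((descS pre).take j).length = j := by rw [List.length_take]; omega
    simp only [goA, hpush_eq _ e hKp]
    by_cases hof : n < gsum pre j + e
    · -- overflow
      rw [if_pos hof]
      by_cases hbreak : (kN : Int) - (j : Int) = 0
      · -- k exhausted: A breaks and returns pre.length
        rw [if_pos hbreak]
        have hjkN : j = kN := by omega
        have hlenle : pre.length ≤ enemy.length := by rw [henemy]; simp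
        have htakepre : enemy.take pre.length = pre := by
          rw [henemy]; exact List.take_left ..
        have htakepre1 : enemy.take (pre.length + 1) = pre ++ [e] := by
          have h0 : enemy = (pre ++ [e]) ++ rest' := by rw [henemy]; simp
          rw [h0]; exact List.take_left' (by simp)
        have hfeas : feasN n kN enemy pre.length = true := by
          unfold feasN
          rcases hI2 with h2 | h2
          · simp only [Bool.or_eq_true_iff, decide_eq_true_eq]
            right
            rw [htakepre]
            exact le_trans (gsum_anti hnnpre hjk) h2
          · simp only [Bool.or_eq_true_iff, decide_eq_true_eq]
            left; omega
        have hgt : n < gsum (pre ++ [e]) kN := by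
          rcases Nat.eq_zero_or_pos j with hj0 | hj1
          · have hkN0 : kN = 0 := by omega
            subst hkN0
            unfold gsum
            rw [List.drop_zero, descS_sum]
            have : gsum pre 0 = pre.sum := by
              unfold gsum; rw [List.drop_zero, descS_sum]
            rw [List.sum_append, List.sum_cons, List.sum_nil]
            subst hj0
            omega
          · have hjd : j - 1 < (descS pre).length := by omega
            by_cases hmj : e ≤ (descS pre)[j-1]
            · have hle : ∀ x ∈ (descS pre).take j, e ≤ x := by
                intro x hx
                exact le_trans hmj (mem_take_ge hdp (by omega) hj1 hx)
              have hdecomp : descS (pre ++ [e]) =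
                  (descS pre).take j ++ dIns e ((descS pre).drop j) := by
                rw [descS_append, dIns_take_decomp e j _ hle]
              have : gsum (pre ++ [e]) j = e + gsum pre j := by
                unfold gsum
                rw [hdecomp, drop_append_len htkj, dIns_sum]
              rw [← hjkN]
              omega
            · push_neg at hmj
              have hdrop : (dIns e (descS pre)).drop ((j-1)+1) =
                  (descS pre)[j-1] :: (descS pre).drop ((j-1)+1) :=
                dIns_drop_of_gt e (descS pre) (j-1) hjd hdp hmj
              have hj1' : j - 1 + 1 = j := by omega
              rw [hj1'] at hdrop
              have : gsum (pre ++ [e]) j = (descS pre)[j-1] + gsum pre j := by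
                unfold gsum
                rw [descS_append, hdrop, List.sum_cons]
              have h4 := hI4 hj1
              rw [gsum_pred hj1 hjp] at h4
              rw [← hjkN]
              omega
        have hnofeas : feasN n kN enemy (pre.length + 1) = false := by
          unfold feasN
          simp only [Bool.or_eq_false_iff, decide_eq_false_iff_not]
          constructor
          · omega
          · rw [htakepre1]; omega
        have h1 : pre.length ≤ maxFeas n kN enemy :=
          Nat.le_findGreatest hlenle hfeas
        have h2 : maxFeas n kN enemy ≤ pre.length := by
          by_contra hcon
          push_neg at hcon
          have hM := Nat.findGreatest_spec (P := fun m => feasN n kN enemy m = true) hlenle hfeas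
          have := feasN_antitone hnn (by omega : pre.length + 1 ≤ maxFeas n kN enemy) hM
          rw [hnofeas] at this
          exact Bool.false_ne_true this
        have : maxFeas n kN enemy = pre.length := by omega
        rw [this]
      · -- pop the largest wave and continue
        rw [if_neg hbreak]
        have hjlt : j < kN := by omega
        obtain ⟨w, hr, hwK⟩ : ∃ w hr, dIns e ((descS pre).drop j) = w :: hr := by
          cases h : dIns e ((descS pre).drop j) with
          | nil => exact absurd h (dIns_ne_nil _ _)
          | cons a b => exact ⟨a, b, rfl⟩
        rw [hwK]
        simp only [List.map_cons]
        have hwsum : w + hr.sum = e + gsum pre j := by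
          have := dIns_sum e ((descS pre).drop j)
          rw [hwK, List.sum_cons] at this
          omega
        have hew : e ≤ w := dIns_head_ge hwK
        have henemy' : enemy = (pre ++ [e]) ++ rest' := by rw [henemy]; simp
        have hlen' : (pre ++ [e]).length = pre.length + 1 := by simp
        -- characterize the new kept list
        have hkey : (descS (pre ++ [e])).drop (j+1) = hr ∧
            n < gsum (pre ++ [e]) j := by
          rcases Nat.eq_zero_or_pos j with hj1 | hj1
          case inl =>
            subst hj1
            constructor
            · rw [descS_append]
              have : dIns e (descS pre) = w :: hr := by
                simpa using hwK
              rw [this, List.drop_succ_cons, List.drop_zero]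
            · unfold gsum
              rw [descS_append, List.drop_zero]
              have : dIns e (descS pre) = w :: hr := by simpa using hwK
              rw [this, List.sum_cons]
              have : gsum pre 0 = (descS pre).sum := by unfold gsum; rw [List.drop_zero]
              omega
          case inr =>
            have hjd : j - 1 < (descS pre).length := by omega
            by_cases hmj : e ≤ (descS pre)[j-1]
            · have hle : ∀ x ∈ (descS pre).take j, e ≤ x := by
                intro x hx
                exact le_trans hmj (mem_take_ge hdp (by omega) hj1 hx)
              have hdecomp : descS (pre ++ [e]) =
                  (descS pre).take j ++ dIns e ((descS pre).drop j) := by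
                rw [descS_append, dIns_take_decomp e j _ hle]
              constructor
              · rw [hdecomp, hwK]
                have h0 : (descS pre).take j ++ w :: hr =
                    ((descS pre).take j ++ [w]) ++ hr := by simp
                rw [h0]
                exact drop_append_len (by simp [htkj])
              · unfold gsum
                rw [hdecomp, drop_append_len htkj, dIns_sum]
                exact lt_of_lt_of_le hof (by rw [hKsum]; omega)
            · push_neg at hmj
              have hflt : ∀ x ∈ (descS pre).drop j, x < e := by
                intro x hx
                exact lt_of_le_of_lt (mem_drop_le hdp hj1 (by omega) hx) hmj
              have hcons : dIns e ((descS pre).drop j) = e :: (descS pre).drop j :=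
                dIns_cons_of_forall_lt e _ hflt
              have hwe : w = e ∧ hr = (descS pre).drop j := by
                rw [hcons] at hwK
                exact ⟨(List.cons.injEq .. ▸ hwK).1.symm, (List.cons.injEq .. ▸ hwK).2.symm⟩
              have hdrop : (dIns e (descS pre)).drop ((j-1)+1) =
                  (descS pre)[j-1] :: (descS pre).drop ((j-1)+1) :=
                dIns_drop_of_gt e (descS pre) (j-1) hjd hdp hmj
              have hj1' : j - 1 + 1 = j := by omega
              rw [hj1'] at hdrop
              constructor
              · rw [descS_append]
                have h0 : (dIns e (descS pre)).drop (j+1) =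
                    ((dIns e (descS pre)).drop j).drop 1 := by
                  rw [List.drop_drop]
                rw [h0, hdrop, List.drop_succ_cons, List.drop_zero]
                exact hwe.2.symm
              · have h4 := hI4 hj1
                rw [gsum_pred hj1 hjp] at h4
                have : gsum (pre ++ [e]) j = (descS pre)[j-1] + gsum pre j := by
                  unfold gsum
                  rw [descS_append, hdrop, List.sum_cons]
                omega
        have hnewsum : gsum (pre ++ [e]) (j+1) = hr.sum := by
          unfold gsum
          rw [hkey.1]
        have hI2' : gsum (pre ++ [e]) (j+1) ≤ n ∨ j+1 = (pre ++ [e]).length := by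
          rcases hI2 with h2 | h2
          · left; rw [hnewsum]; omega
          · right; rw [hlen']; omega
        have hI4' : 1 ≤ j+1 → n < gsum (pre ++ [e]) ((j+1)-1) := by
          intro _
          simpa using hkey.2
        have hcall := ih (pre ++ [e]) (j+1) henemy' (by omega) (by rw [hlen']; omega) hI2' hI4'
        rw [hlen'] at hcall
        rw [hkey.1, hnewsum] at hcall
        have hcast1 : ((pre.length + 1 : Nat) : Int) = (pre.length : Int) + 1 := by push_cast; ring
        have hcast2 : ((kN : Int) - ((j+1 : Nat) : Int)) = (kN : Int) - (j : Int) - 1 := by push_cast; ring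
        rw [hcast1, hcast2] at hcall
        have hargsum : hr.sum = gsum pre j + e + -w := by omega
        rw [← hargsum]
        exact hcall
    · -- no overflow: survive the round unchanged
      rw [if_neg hof]
      have hle : ∀ x ∈ (descS pre).take j, e ≤ x := by
        rcases Nat.eq_zero_or_pos j with hj0 | hj1
        · subst hj0; intro x hx; simp at hx
        · intro x hx
          have hjd : j - 1 < (descS pre).length := by omega
          have hmj : e ≤ (descS pre)[j-1] := by
            by_contra hcon
            push_neg at hcon
            have h4 := hI4 hj1
            rw [gsum_pred hj1 hjp] at h4
            omega
          exact le_trans hmj (mem_take_ge hdp (by omega) hj1 hx)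
      have hdecomp : descS (pre ++ [e]) =
          (descS pre).take j ++ dIns e ((descS pre).drop j) := by
        rw [descS_append, dIns_take_decomp e j _ hle]
      have henemy' : enemy = (pre ++ [e]) ++ rest' := by rw [henemy]; simp
      have hlen' : (pre ++ [e]).length = pre.length + 1 := by simp
      have hgsum' : gsum (pre ++ [e]) j = gsum pre j + e := by
        unfold gsum
        rw [hdecomp, drop_append_len htkj, dIns_sum]
        rw [hKsum]; ring
      have hdrop' : (descS (pre ++ [e])).drop j = dIns e ((descS pre).drop j) := by
        rw [hdecomp, drop_append_len htkj]
      have hI2' : gsum (pre ++ [e]) j ≤ n ∨ j = (pre ++ [e]).length := by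
        left; rw [hgsum']; omega
      have hI4' : 1 ≤ j → n < gsum (pre ++ [e]) (j-1) := by
        intro hj1
        have h4 := hI4 hj1
        have hjd : j - 1 < (descS pre).length := by omega
        have : gsum (pre ++ [e]) (j-1) =
            (descS pre)[j-1] + (e + gsum pre j) := by
          unfold gsum
          rw [hdecomp, List.drop_append_of_le_length (by rw [List.length_take]; omega),
            take_drop_pred hj1 (by omega), List.sum_append, List.sum_cons, List.sum_nil,
            dIns_sum]
          rw [hKsum]; ring
        rw [gsum_pred hj1 hjp] at h4
        omega
      have hcall := ih (pre ++ [e]) j henemy' hjk (by rw [hlen']; omega) hI2' hI4'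
      rw [hlen', hgsum', hdrop'] at hcall
      have hcast1 : ((pre.length + 1 : Nat) : Int) = (pre.length : Int) + 1 := by push_cast; ring
      rw [hcast1] at hcall
      exact hcall


theorem sortedB_eq (l : List Int) :
    PySem.List.sorted l (fun x => x) false = (descS l).reverse := by
  apply PySem.List.sorted_id_eq_of_perm_of_pairwise
  · exact (List.reverse_perm (descS l)).trans (descS_perm l)
  · rw [List.pairwise_reverse]
    exact descS_pairwise l

theorem feasN_zero (n : Int) (kN : Nat) (enemy : List Int) :
    feasN n kN enemy 0 = true := by
  unfold feasN
  simp

theorem feasibleB_eq (n k : Int) (enemy : List Int) (hk : 0 ≤ k) (mN : Nat)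
    (hm : mN ≤ enemy.length) :
    feasibleB n k enemy (mN : Int) = feasN n k.toNat enemy mN := by
  unfold feasibleB feasN
  by_cases h1 : (mN : Int) ≤ k
  · rw [if_pos h1]
    have h2 : mN ≤ k.toNat := by omega
    simp [h2]
  · rw [if_neg h1]
    have h2 : ¬ (mN ≤ k.toNat) := by omega
    have hkm : k.toNat < mN := by omega
    simp only [PySem.List.slice_to_natCast, sortedB_eq]
    have hmk : (mN : Int) - k = ((mN - k.toNat : Nat) : Int) := by omega
    rw [hmk, PySem.List.slice_to_natCast]
    have hdlen : (descS (enemy.take mN)).length = mN := by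
      rw [descS_length, List.length_take]; omega
    have htk : (descS (enemy.take mN)).reverse.take (mN - k.toNat) =
        ((descS (enemy.take mN)).drop k.toNat).reverse := by
      rw [List.take_reverse, hdlen]
      have h9 : mN - (mN - k.toNat) = k.toNat := by omega
      rw [h9]
    rw [htk, List.sum_reverse]
    have : ((descS (enemy.take mN)).drop k.toNat).sum = gsum (enemy.take mN) k.toNat := rfl
    rw [this]
    simp [h2]

theorem bsearch_correct (n k : Int) (enemy : List Int) (hk : 0 ≤ k)
    (hnn : ∀ x ∈ enemy, 0 ≤ x) :
    ∀ (fuel : Nat) (lo hi : Int), (hi - lo).toNat ≤ fuel → 0 ≤ lo →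
    lo ≤ (maxFeas n k.toNat enemy : Int) →
    (maxFeas n k.toNat enemy : Int) ≤ hi → hi ≤ (enemy.length : Int) →
    bsearchB n k enemy lo hi = (maxFeas n k.toNat enemy : Int) := by
  have hfeasM : feasN n k.toNat enemy (maxFeas n k.toNat enemy) = true :=
    Nat.findGreatest_spec (P := fun m => feasN n k.toNat enemy m = true)
      (Nat.zero_le _) (feasN_zero n k.toNat enemy)
  intro fuel
  induction fuel with
  | zero =>
    intro lo hi hfuel h0 hloM hMhi hhilen
    have hlohi : ¬ lo < hi := by omega
    rw [bsearchB, dif_neg hlohi]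
    omega
  | succ fuel' ih =>
    intro lo hi hfuel h0 hloM hMhi hhilen
    by_cases hlohi : lo < hi
    · rw [bsearchB, dif_pos hlohi]
      have hmid : lo < PySem.Int.floordiv (lo + hi + 1) 2 ∧
          PySem.Int.floordiv (lo + hi + 1) 2 ≤ hi := by
        rw [PySem.Int.floordiv_eq_ediv_of_pos (by omega)]
        omega
      set mid := PySem.Int.floordiv (lo + hi + 1) 2 with hmiddef
      have hmidcast : mid = ((mid.toNat : Nat) : Int) := by omega
      have hmidlen : mid.toNat ≤ enemy.length := by omega
      have hfeq : feasibleB n k enemy mid = feasN n k.toNat enemy mid.toNat := by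
        rw [hmidcast]
        exact feasibleB_eq n k enemy hk mid.toNat hmidlen
      by_cases hfm : feasibleB n k enemy mid = true
      · rw [if_pos hfm]
        have hmle : mid.toNat ≤ maxFeas n k.toNat enemy := by
          by_contra hcon
          push_neg at hcon
          have := Nat.findGreatest_is_greatest (P := fun m => feasN n k.toNat enemy m = true)
            hcon hmidlen
          rw [hfeq] at hfm
          exact this hfm
        exact ih mid hi (by omega) (by omega) (by omega) hMhi hhilen
      · rw [if_neg hfm]
        have hmgt : (maxFeas n k.toNat enemy : Int) ≤ mid - 1 := by
          have : ¬ (mid.toNat ≤ maxFeas n k.toNat enemy) := by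
            intro hcon
            have := feasN_antitone hnn hcon hfeasM
            rw [hfeq] at hfm
            exact hfm this
          omega
        exact ih lo (mid - 1) (by omega) h0 hloM hmgt (by omega)
    · rw [bsearchB, dif_neg hlohi]
      omega


theorem hpush_cons (heap : List Int) (x : Int) : ∃ w hr, hpush heap x = w :: hr := by
  cases heap with
  | nil => exact ⟨x, [], rfl⟩
  | cons h t =>
    simp only [hpush]
    split
    · exact ⟨x, h :: t, rfl⟩
    · exact ⟨h, hpush t x, rfl⟩

theorem posSum_nonneg (l : List Int) : 0 ≤ posSum l := by
  unfold posSum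
  apply List.sum_nonneg
  intro x hx
  obtain ⟨e, _, rfl⟩ := List.mem_map.1 hx
  omega

theorem sum_le_posSum (l : List Int) : l.sum ≤ posSum l := by
  unfold posSum
  induction l with
  | nil => simp
  | cons h t ih => simp only [List.sum_cons, List.map_cons]; omega

theorem posSum_sublist_le {l' l : List Int} (h : l'.Sublist l) : posSum l' ≤ posSum l := by
  unfold posSum
  exact List.Sublist.sum_le_sum (h.map _) (by
    intro x hx
    obtain ⟨e, _, rfl⟩ := List.mem_map.1 hx
    omega)

theorem posSum_perm {l' l : List Int} (h : l'.Perm l) : posSum l' = posSum l := by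
  unfold posSum
  exact (h.map _).sum_eq

theorem goA_bigk (n : Int) : ∀ (rest : List Int) (ans total : Int) (heap : List Int)
    (kr : Int), (rest.length : Int) ≤ kr →
    goA n rest ans total heap kr = ans + rest.length := by
  intro rest
  induction rest with
  | nil => intro ans total heap kr _; simp [goA]
  | cons e rest' ih =>
    intro ans total heap kr hkr
    simp only [List.length_cons] at hkr
    have hkr0 : kr ≠ 0 := by push_cast at hkr; omega
    simp only [goA]
    by_cases hof : n < total + e
    · rw [if_pos hof, if_neg hkr0]
      obtain ⟨w, hr, hw⟩ := hpush_cons heap (-e)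
      rw [hw]
      show goA n rest' (ans + 1) ((total + e) + w) hr (kr - 1) = ans + ((e :: rest').length : Int)
      rw [ih (ans + 1) (total + e + w) hr (kr - 1) (by push_cast at *; omega)]
      simp only [List.length_cons]; push_cast; ring
    · rw [if_neg hof]
      rw [ih (ans + 1) (total + e) (hpush heap (-e)) kr (by push_cast at *; omega)]
      simp only [List.length_cons]; push_cast; ring

theorem goA_allfit (n : Int) : ∀ (rest : List Int) (ans total : Int) (heap : List Int)
    (kr : Int), total + posSum rest ≤ n →
    goA n rest ans total heap kr = ans + rest.length := by
  intro rest
  induction rest with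
  | nil => intro ans total heap kr _; simp [goA]
  | cons e rest' ih =>
    intro ans total heap kr hfit
    have hps : posSum (e :: rest') = max e 0 + posSum rest' := by
      unfold posSum; simp
    have hps' : 0 ≤ posSum rest' := posSum_nonneg rest'
    have hof : ¬ n < total + e := by rw [hps] at hfit; omega
    simp only [goA, if_neg hof]
    rw [ih (ans + 1) (total + e) (hpush heap (-e)) kr (by rw [hps] at hfit; omega)]
    simp only [List.length_cons]; push_cast; ring

theorem feasibleB_all (n k : Int) (enemy : List Int) (hfit : posSum enemy ≤ n)
    (m : Int) (h0 : 0 ≤ m) : feasibleB n k enemy m = true := by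
  unfold feasibleB
  by_cases h1 : m ≤ k
  · rw [if_pos h1]
  · rw [if_neg h1]
    obtain ⟨mN, rfl⟩ : ∃ mN : Nat, m = (mN : Int) := ⟨m.toNat, by omega⟩
    have hsN : (mN : Int) - k = ((((mN : Int) - k).toNat : Nat) : Int) := by omega
    rw [PySem.List.slice_to_natCast, sortedB_eq, hsN]
    simp only [PySem.List.slice_to_natCast, decide_eq_true_eq]
    set x := ((descS (enemy.take mN)).reverse.take ((mN : Int) - k).toNat) with hx
    have h2 : posSum x ≤ posSum ((descS (enemy.take mN)).reverse) :=
      posSum_sublist_le (List.take_sublist _ _)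
    have h3 : posSum ((descS (enemy.take mN)).reverse) = posSum (enemy.take mN) :=
      posSum_perm ((List.reverse_perm _).trans (descS_perm _))
    have h4 : posSum (enemy.take mN) ≤ posSum enemy :=
      posSum_sublist_le (List.take_sublist _ _)
    have h5 := sum_le_posSum x
    omega

theorem bsearch_allfeas (n k : Int) (enemy : List Int) :
    ∀ (fuel : Nat) (lo hi : Int), (hi - lo).toNat ≤ fuel → 0 ≤ lo → lo ≤ hi →
    (∀ m : Int, 0 ≤ m → m ≤ hi → feasibleB n k enemy m = true) →
    bsearchB n k enemy lo hi = hi := by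
  intro fuel
  induction fuel with
  | zero =>
    intro lo hi hfuel h0 hlohi _
    rw [bsearchB, dif_neg (by omega : ¬ lo < hi)]
    omega
  | succ fuel' ih =>
    intro lo hi hfuel h0 hlohi hall
    by_cases hlt : lo < hi
    · rw [bsearchB, dif_pos hlt]
      have hmid : lo < PySem.Int.floordiv (lo + hi + 1) 2 ∧
          PySem.Int.floordiv (lo + hi + 1) 2 ≤ hi := by
        rw [PySem.Int.floordiv_eq_ediv_of_pos (by omega)]
        omega
      rw [if_pos (hall _ (by omega) (by omega))]
      exact ih _ _ (by omega) (by omega) (by omega) hall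
    · rw [bsearchB, dif_neg hlt]
      omega

-- ===== VERDICT (by name: the statement is the Claim_ definition above) =====
theorem solution_spec : Claim_equal_solution := by
  unfold Claim_equal_solution Spec_solution
  intro n k enemy _hdom hpre
  rcases hpre with ⟨hk, hnn⟩ | hfit | hbig
  case inr.inl =>
    unfold solution solution_alt
    rw [goA_allfit n enemy 0 0 [] k (by have := posSum_nonneg enemy; omega)]
    rw [PySem.List.len_eq,
      bsearch_allfeas n k enemy enemy.length 0 (enemy.length : Int) (by omega) (by omega)
        (by omega) (fun m hm _ => feasibleB_all n k enemy hfit m hm)]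
    ring
  case inr.inr =>
    unfold solution solution_alt
    rw [goA_bigk n enemy 0 0 [] k hbig]
    rw [PySem.List.len_eq,
      bsearch_allfeas n k enemy enemy.length 0 (enemy.length : Int) (by omega) (by omega)
        (by omega) ?_]
    · ring
    · intro m hm hmhi
      unfold feasibleB
      rw [if_pos (by omega : m ≤ k)]
  unfold solution solution_alt
  have h1 := goA_inv n k.toNat enemy hnn enemy [] 0 (by simp) (by omega) (by simp)
    (by right; rfl) (by omega)
  have hdesc0 : descS ([] : List Int) = [] := rfl
  have hg0 : gsum ([] : List Int) 0 = 0 := rfl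
  rw [hg0, hdesc0] at h1
  simp only [List.length_nil, Nat.cast_zero, List.drop_nil, List.map_nil, Int.sub_zero] at h1
  rw [Int.toNat_of_nonneg hk] at h1
  have h2 := bsearch_correct n k enemy hk hnn enemy.length 0 (enemy.length : Int)
    (by omega) (by omega) (by omega)
    (by exact_mod_cast Nat.cast_le.2 (Nat.findGreatest_le enemy.length))
    (by omega)
  rw [PySem.List.len_eq, h1, h2]
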